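-- pv_equiv track=rewrite | github.com/KungCheops/aigrader | examples/assignment-10/assignment-10-R-00233144228034.py | occurrences
-- ===== SOURCE A (Python) =====
-- def occurrences(ds, queries):
--     result = []
--     for q in queries:
--         results = []
--         for i, c in enumerate(ds):
--             if c == q:
--                 results.append(i)
--         result.append(results)
--     return result
-- ===== SOURCE B (Python) =====
-- def occurrences(ds, queries):
--     index = {}
--     for i, c in enumerate(ds):
--         index.setdefault(c, []).append(i)
--     return [index.get(q, []) for q in queries]
-- ===== Notes on version B (the rewrite author's own statement) =====
-- stated objective: faster
-- what changed: Instead of rescanning the whole string for every query, B builds a char->indices dictionary in one pass over the string and answers each query by a single lookup.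
import Mathlib
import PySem

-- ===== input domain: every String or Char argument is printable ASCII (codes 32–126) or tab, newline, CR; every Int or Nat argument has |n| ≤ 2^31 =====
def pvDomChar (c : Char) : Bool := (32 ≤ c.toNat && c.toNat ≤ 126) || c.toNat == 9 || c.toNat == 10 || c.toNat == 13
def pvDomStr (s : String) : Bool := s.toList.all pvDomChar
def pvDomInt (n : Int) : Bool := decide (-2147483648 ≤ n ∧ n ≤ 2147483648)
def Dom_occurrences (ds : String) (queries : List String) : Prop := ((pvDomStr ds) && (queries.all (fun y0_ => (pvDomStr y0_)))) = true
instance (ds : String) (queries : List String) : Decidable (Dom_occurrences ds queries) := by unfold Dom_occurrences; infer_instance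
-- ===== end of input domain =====

-- B replaces A's per-query rescan of the string by one grouping pass (char -> index list) plus a lookup per query.
-- A mutates nothing; equivalence is about the return value.

-- ===== PORT A =====
-- for each query, scan enumerate(ds) and collect matching indices
def occurrences (ds : String) (queries : List String) : List (List Int) :=
  queries.foldl (fun result q =>
    result ++ [(PySem.List.enumerate ds.toList).foldl
      (fun results p => if String.mk [p.2] == q then results ++ [p.1] else results) []]) []

-- ===== PORT B =====
-- one pass: group indices by character in a dict, then one lookup per query
def occurrences_alt (ds : String) (queries : List String) : List (List Int) :=
  let index : PySem.Dict String (List Int) :=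
    (PySem.List.enumerate ds.toList).foldl
      (fun d p => d.modify (String.mk [p.2]) [] (· ++ [p.1])) PySem.Dict.empty
  queries.map (fun q => index.getD q [])

-- ===== PRECONDITION & SPEC =====
def Spec_occurrences (ds : String) (queries : List String) (out : List (List Int)) : Prop := out = occurrences_alt ds queries
instance (ds : String) (queries : List String) (out : List (List Int)) : Decidable (Spec_occurrences ds queries out) := by unfold Spec_occurrences; infer_instance

-- ===== CLAIM (what is proved, stated in full; the proofs are below) =====
def Claim_equal_occurrences : Prop := ∀ (ds : String) (queries : List String), Dom_occurrences ds queries → Spec_occurrences ds queries (occurrences ds queries)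

-- ===== LEMMAS AND PROOFS =====

-- both sides reduce to the same filter-map over enumerate(ds)
theorem occurrences_eq (ds : String) (queries : List String) :
    occurrences ds queries = occurrences_alt ds queries := by
  unfold occurrences occurrences_alt
  rw [PySem.List.foldl_append_singleton_eq_map]
  apply List.map_congr_left
  intro q _
  rw [PySem.List.foldl_append_if]
  have hmap : (PySem.List.enumerate ds.toList (0:Int)).foldl
      (fun d p => d.modify (String.mk [p.2]) [] (· ++ [p.1])) PySem.Dict.empty
    = ((PySem.List.enumerate ds.toList (0:Int)).map (fun p => (String.mk [p.2], p.1))).foldl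
      (fun d p => d.modify p.1 [] (· ++ [p.2])) PySem.Dict.empty := by
    rw [List.foldl_map]
  rw [hmap, PySem.Dict.getD_foldl_modify_append, List.filter_map]
  simp [Function.comp_def]

-- ===== VERDICT (by name: the statement is the Claim_ definition above) =====
theorem occurrences_spec : Claim_equal_occurrences := by
  intro ds queries _
  unfold Spec_occurrences
  exact occurrences_eq ds queries
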